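-- pv_equiv track=rewrite | github.com/ModPunchtree/URCL-Optimiser-V2 | URCLOptimiserV2/urcl_optimiser_v2.py | removeMultiLabels
-- ===== SOURCE A (Python) =====
-- def removeMultiLabels(code: list):
--
--     success = False
--
--     for index, line in enumerate(code):
--         if line[0].startswith("."):
--             if index + 1 < len(code):
--                 if code[index + 1][0].startswith("."):
--                     label1 = line[0]
--                     label2 = code[index + 1][0]
--
--                     for index2, line2 in enumerate(code):
--                         for index3, token in enumerate(line2):
--                             if token == label2:
--                                 code[index2][index3] = label1
--
--                     code.pop(index + 1)
--
--                     success = True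
--
--                     return removeMultiLabels(code)[0], success
--
--     return code, success
-- ===== SOURCE B (Python) =====
-- # Single-pass re-implementation: build a label-canonicalisation map with
-- # chained lookups (union-find style) in one pass, then rewrite every token once.
-- # Unlike A, B does not mutate `code` in place; return-value equivalence only.
--
-- def _resolve(mapping, t):
--     while t in mapping:
--         t = mapping[t]
--     return t
--
--
-- def removeMultiLabels(code: list):
--     mapping = {}
--     out = []
--     success = False
--     prev_label = False
--     canon = ""
--     for line in code:
--         is_label = line[0].startswith(".")
--         if is_label and prev_label:
--             r = _resolve(mapping, line[0])
--             if r != canon: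
--                 mapping[r] = canon
--             success = True
--         else:
--             if is_label:
--                 canon = _resolve(mapping, line[0])
--             out.append(line)
--         prev_label = is_label
--     return [[_resolve(mapping, t) for t in line] for line in out], success
-- ===== Notes on version B (the rewrite author's own statement) =====
-- stated objective: alternative
-- what changed: A repeatedly rescans and rewrites the whole program once per merged label pair (recursing after each merge); B makes one pass that records each merged label in a chained canonicalisation dictionary and then rewrites every token once at the end.
import Mathlib
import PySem

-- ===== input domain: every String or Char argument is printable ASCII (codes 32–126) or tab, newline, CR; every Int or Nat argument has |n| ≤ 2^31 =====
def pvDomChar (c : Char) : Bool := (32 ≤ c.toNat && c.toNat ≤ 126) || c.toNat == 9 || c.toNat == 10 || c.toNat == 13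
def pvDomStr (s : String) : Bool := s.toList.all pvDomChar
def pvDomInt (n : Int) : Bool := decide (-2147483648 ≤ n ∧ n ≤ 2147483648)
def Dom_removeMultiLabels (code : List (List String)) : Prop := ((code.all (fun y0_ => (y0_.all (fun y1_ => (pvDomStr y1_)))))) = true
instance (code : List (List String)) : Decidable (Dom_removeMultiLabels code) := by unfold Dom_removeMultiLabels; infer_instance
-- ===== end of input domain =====

-- B replaces A's rescan-and-rewrite-per-merge recursion by one pass recording merged
-- labels in a chained canonicalisation dict plus one final rewrite pass (alternative algorithm).
-- A mutates `code` in place (pops/rewrites lines); B does not: equivalence is about the return value.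

-- ===== PORT A =====

-- line[0] (IndexError on an empty line is excluded by Pre_; totalized with "")
def pyHead0 (line : List String) : String := (PySem.List.pyGet? line 0).getD ""

-- line[0].startswith(".")
def pyIsLabelLine (line : List String) : Bool := PySem.Str.startswith (pyHead0 line) "."

-- A's outer `for index, line in enumerate(code)` scan for the first adjacent label pair
def findPairA : List (List String) → Option (Nat × String × String)
  | [] => none
  | [_] => none
  | x :: y :: rest =>
      if pyIsLabelLine x && pyIsLabelLine y then some (0, pyHead0 x, pyHead0 y)
      else (findPairA (y :: rest)).map (fun p => (p.1 + 1, p.2.1, p.2.2))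

def removeMultiLabelsGo : Nat → List (List String) → List (List String) × Bool
  | 0, code => (code, false)
  | fuel+1, code =>
    match findPairA code with
    | none => (code, false)
    | some (i, l1, l2) =>
      -- the token-rewrite double loop, then code.pop(index + 1), then the recursive call
      let replaced := code.map (fun line => line.map (fun t => if t = l2 then l1 else t))
      let popped := replaced.eraseIdx (i + 1)
      ((removeMultiLabelsGo fuel popped).1, true)  -- (removeMultiLabels(code)[0], True)

def removeMultiLabels (code : List (List String)) : List (List String) × Bool :=
  ((removeMultiLabelsGo code.length code).1,
   (removeMultiLabelsGo code.length code).2)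

-- ===== PORT B =====

structure BState where
  m : PySem.Dict String String
  out : List (List String)
  success : Bool
  prevLabel : Bool
  canon : String
deriving Repr

-- Source B's _resolve while-loop (fuel = number of dict entries; chains are acyclic and
-- strictly descend, so this fuel is always enough — proved below)
def resolveB (m : PySem.Dict String String) : Nat → String → String
  | 0, t => t
  | f+1, t =>
    match PySem.Dict.get? m t with
    | none => t
    | some u => resolveB m f u

-- one iteration of Source B's `for line in code` loop
def stepB (s : BState) (line : List String) : BState :=
  let isl := pyIsLabelLine line
  if isl && s.prevLabel then
    let r := resolveB s.m s.m.size (pyHead0 line)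
    { s with m := if r = s.canon then s.m else s.m.insert r s.canon,
             success := true, prevLabel := true }
  else
    { s with out := s.out ++ [line],
             canon := if isl then resolveB s.m s.m.size (pyHead0 line) else s.canon,
             prevLabel := isl }

def removeMultiLabels_alt (code : List (List String)) : List (List String) × Bool :=
  let s := code.foldl stepB ⟨PySem.Dict.empty, [], false, false, ""⟩
  (s.out.map (fun line => line.map (fun t => resolveB s.m s.m.size t)), s.success)

-- ===== PRECONDITION & SPEC =====
-- Pre_ excludes code containing an empty token line: there Python A (and Python B)
-- raises IndexError on line[0]; A returns normally on every other input.
def Pre_removeMultiLabels (code : List (List String)) : Prop := ∀ line ∈ code, line ≠ []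
instance (code : List (List String)) : Decidable (Pre_removeMultiLabels code) := by
  unfold Pre_removeMultiLabels; infer_instance

def pvWitness_removeMultiLabels : List (List String) :=
  [[".L0"], [".L1", "X"], ["ADD", ".L1", "R1"], [".L2"], ["MOV", ".L2"]]

def Spec_removeMultiLabels (code : List (List String)) (out : List (List String) × Bool) : Prop := out = removeMultiLabels_alt code
instance (code : List (List String)) (out : List (List String) × Bool) : Decidable (Spec_removeMultiLabels code out) := by unfold Spec_removeMultiLabels; infer_instance

-- ===== CLAIM (what is proved, stated in full; the proofs are below) =====
def Claim_equal_removeMultiLabels : Prop := ∀ (code : List (List String)), Dom_removeMultiLabels code → Pre_removeMultiLabels code → Spec_removeMultiLabels code (removeMultiLabels code)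

-- ===== LEMMAS AND PROOFS =====

-- token substitution performed by A's rewrite loop
def subT (l2 l1 t : String) : String := if t = l2 then l1 else t
def subL (l2 l1 : String) (line : List String) : List String := line.map (subT l2 l1)

-- "no two adjacent label lines"
def NoPairP : List (List String) → Prop :=
  List.IsChain (fun a b => ¬(pyIsLabelLine a = true ∧ pyIsLabelLine b = true))

-- acyclicity invariant of the canonicalisation dict: every value avoids all keys
-- at or before its own entry ("seen" accumulates the earlier keys)
def OrdA (seen : List String) : List (String × String) → Prop
  | [] => True
  | (k, v) :: ms => v ∉ seen ∧ v ≠ k ∧ OrdA (seen ++ [k]) ms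

def keysOf (ms : List (String × String)) : List String := ms.map Prod.fst
def rankM (ms : List (String × String)) (t : String) : Nat := ms.length - List.idxOf t (keysOf ms)

theorem ordA_mono (ms : List (String × String)) : ∀ s s', (∀ x ∈ s', x ∈ s) → OrdA s ms → OrdA s' ms := by
  induction ms with
  | nil => intro s s' _ _; trivial
  | cons p ms ih =>
    rintro s s' hsub ⟨h1, h2, h3⟩
    refine ⟨fun hm => h1 (hsub _ hm), h2, ih (s ++ [p.1]) (s' ++ [p.1]) ?_ h3⟩
    intro x hx
    rcases List.mem_append.1 hx with h | h
    · exact List.mem_append.2 (Or.inl (hsub _ h))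
    · exact List.mem_append.2 (Or.inr h)


theorem ordA_append (ms : List (String × String)) (r c : String) :
    ∀ s, OrdA s (ms ++ [(r, c)]) ↔ OrdA s ms ∧ c ∉ s ∧ c ∉ keysOf ms ∧ c ≠ r := by
  induction ms with
  | nil => intro s; simp [OrdA, keysOf]
  | cons p ms ih =>
    intro s
    obtain ⟨k, v⟩ := p
    simp only [List.cons_append, OrdA, ih (s ++ [k]), keysOf, List.map_cons, List.mem_cons,
      List.mem_append]
    tauto


theorem ordA_split (ms : List (String × String)) : ∀ s pre k v suf, OrdA s ms →
    ms = pre ++ (k, v) :: suf → v ∉ s ∧ v ≠ k ∧ v ∉ keysOf pre := by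
  induction ms with
  | nil => intro s pre k v suf _ h; exact absurd h (by simp)
  | cons p ms ih =>
    intro s pre k v suf ho hms
    cases pre with
    | nil =>
      simp only [List.nil_append, List.cons.injEq] at hms
      obtain ⟨rfl, rfl⟩ := hms
      obtain ⟨h1, h2, _⟩ := ho
      exact ⟨h1, h2, by simp [keysOf]⟩
    | cons q pre =>
      simp only [List.cons_append, List.cons.injEq] at hms
      obtain ⟨hpq, hms⟩ := hms
      subst hpq
      obtain ⟨_, _, h3⟩ := ho
      obtain ⟨ha, hb, hc⟩ := ih (s ++ [p.1]) pre k v suf h3 hms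
      refine ⟨fun h => ha (List.mem_append.2 (Or.inl h)), hb, ?_⟩
      simp only [keysOf, List.map_cons, List.mem_cons]
      rintro (h | h)
      · exact ha (List.mem_append.2 (Or.inr (by simp [h])))
      · exact hc h


theorem get?_mk_eq_some (ms : List (String × String)) (t v : String) :
    (PySem.Dict.mk ms).get? t = some v → ∃ pre suf, ms = pre ++ (t, v) :: suf ∧ t ∉ keysOf pre := by
  induction ms with
  | nil => intro h; simp [PySem.Dict.get?] at h
  | cons p ms ih =>
    obtain ⟨k, w⟩ := p
    intro h
    rw [PySem.Dict.get?_mk_cons] at h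
    by_cases hk : k = t
    · subst hk
      simp only [beq_self_eq_true, if_true, Option.some.injEq] at h
      exact ⟨[], ms, by simp [h], by simp [keysOf]⟩
    · simp only [beq_iff_eq, hk, if_false] at h
      obtain ⟨pre, suf, h1, h2⟩ := ih h
      refine ⟨(k, w) :: pre, suf, by simp [h1], ?_⟩
      simp only [keysOf, List.map_cons, List.mem_cons]
      rintro (h | h)
      · exact hk h.symm
      · exact h2 h


theorem idxOf_first (l1 : List String) (t : String) (l2 : List String) (h : t ∉ l1) :
    List.idxOf t (l1 ++ t :: l2) = l1.length := by
  induction l1 with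
  | nil => simp
  | cons a l1 ih =>
    simp only [List.mem_cons, not_or] at h
    simp [List.idxOf_cons, beq_iff_eq, Ne.symm h.1, ih h.2]


theorem idxOf_later (l1 : List String) (t v : String) (l2 : List String) (h1 : v ∉ l1) (h2 : v ≠ t) :
    List.idxOf v (l1 ++ t :: l2) = l1.length + 1 + List.idxOf v l2 := by
  induction l1 with
  | nil => simp [List.idxOf_cons, beq_iff_eq, Ne.symm h2]; omega
  | cons a l1 ih =>
    simp only [List.mem_cons, not_or] at h1
    simp [List.idxOf_cons, beq_iff_eq, Ne.symm h1.1, ih h1.2]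
    omega


theorem keyrank (ms : List (String × String)) (t v : String) (ho : OrdA [] ms)
    (h : (PySem.Dict.mk ms).get? t = some v) : rankM ms v < rankM ms t := by
  obtain ⟨pre, suf, rfl, hpre⟩ := get?_mk_eq_some ms t v h
  obtain ⟨_, hvt, hvpre⟩ := ordA_split _ [] pre t v suf ho rfl
  unfold rankM keysOf
  rw [List.map_append, List.map_cons]
  rw [idxOf_first (pre.map Prod.fst) t (suf.map Prod.fst) (by simpa [keysOf] using hpre)]
  rw [idxOf_later (pre.map Prod.fst) t v (suf.map Prod.fst) (by simpa [keysOf] using hvpre) hvt]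
  have hidx : List.idxOf v (suf.map Prod.fst) ≤ suf.length := by
    simpa using List.idxOf_le_length (a := v) (l := suf.map Prod.fst)
  simp only [List.length_append, List.length_cons, List.length_map]
  omega


theorem rankm_le (ms : List (String × String)) (t : String) : rankM ms t ≤ ms.length := by
  exact Nat.sub_le _ _


theorem resolveB_of_none (m : PySem.Dict String String) (t : String)
    (h : m.get? t = none) : ∀ f, resolveB m f t = t := by
  intro f; cases f with
  | zero => rfl
  | succ f => simp [resolveB, h]

theorem fuelirr (ms : List (String × String)) (ho : OrdA [] ms) :
    ∀ n t f g, rankM ms t = n → n ≤ f → n ≤ g →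
    resolveB (PySem.Dict.mk ms) f t = resolveB (PySem.Dict.mk ms) g t := by
  intro n
  induction n using Nat.strong_induction_on with
  | _ n IH =>
    intro t f g hr hf hg
    cases hget : (PySem.Dict.mk ms).get? t with
    | none => rw [resolveB_of_none _ _ hget, resolveB_of_none _ _ hget]
    | some u =>
      have hlt := keyrank ms t u ho hget
      have hn : 1 ≤ n := by omega
      obtain ⟨f', rfl⟩ : ∃ f', f = f' + 1 := ⟨f - 1, by omega⟩
      obtain ⟨g', rfl⟩ : ∃ g', g = g' + 1 := ⟨g - 1, by omega⟩
      simp only [resolveB, hget]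
      exact IH (rankM ms u) (by omega) u f' g' rfl (by omega) (by omega)


theorem get?_mk_ne_none (ms : List (String × String)) (t : String) (h : t ∈ keysOf ms) :
    (PySem.Dict.mk ms).get? t ≠ none := by
  induction ms with
  | nil => simp [keysOf] at h
  | cons p ms ih =>
    obtain ⟨k, w⟩ := p
    rw [PySem.Dict.get?_mk_cons]
    by_cases hk : k = t
    · simp [hk]
    · simp only [beq_iff_eq]
      rw [if_neg hk]
      simp only [keysOf, List.map_cons, List.mem_cons] at h
      exact ih (h.resolve_left (fun hh => hk hh.symm))

theorem nonkey (ms : List (String × String)) (ho : OrdA [] ms) :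
    ∀ n t f, rankM ms t = n → n ≤ f → resolveB (PySem.Dict.mk ms) f t ∉ keysOf ms := by
  intro n
  induction n using Nat.strong_induction_on with
  | _ n IH =>
    intro t f hr hf
    cases hget : (PySem.Dict.mk ms).get? t with
    | none =>
      rw [resolveB_of_none _ _ hget]
      intro hmem
      exact get?_mk_ne_none ms t hmem hget
    | some u =>
      have hlt := keyrank ms t u ho hget
      obtain ⟨f', rfl⟩ : ∃ f', f = f' + 1 := ⟨f - 1, by omega⟩
      simp only [resolveB, hget]
      exact IH (rankM ms u) (by omega) u f' rfl (by omega)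


theorem avoid (ms : List (String × String)) (l2 l1 : String)
    (hk : l2 ∉ keysOf ms) (hv : l2 ∉ ms.map Prod.snd) :
    ∀ f t, t ≠ l2 → resolveB (PySem.Dict.mk ((l2, l1) :: ms)) f t = resolveB (PySem.Dict.mk ms) f t := by
  intro f
  induction f with
  | zero => intro t _; rfl
  | succ f ih =>
    intro t ht
    have hget : (PySem.Dict.mk ((l2, l1) :: ms)).get? t = (PySem.Dict.mk ms).get? t := by
      rw [PySem.Dict.get?_mk_cons]
      simp only [beq_iff_eq]
      rw [if_neg (Ne.symm ht)]
    simp only [resolveB, hget]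
    cases hg : (PySem.Dict.mk ms).get? t with
    | none => rfl
    | some u =>
      obtain ⟨pre, suf, hsplit, -⟩ := get?_mk_eq_some ms t u hg
      have hu : u ≠ l2 := by
        intro h; subst h
        exact hv (by rw [hsplit]; simp)
      exact ih u hu


theorem rs (ms : List (String × String)) (l2 l1 : String)
    (hk : l2 ∉ keysOf ms) (hv : l2 ∉ ms.map Prod.snd) (hne : l1 ≠ l2) (ho : OrdA [] ms) (t : String) :
    resolveB (PySem.Dict.mk ((l2, l1) :: ms)) (ms.length + 1) t = resolveB (PySem.Dict.mk ms) ms.length (subT l2 l1 t) := by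
  by_cases ht : t = l2
  · have hget : (PySem.Dict.mk ((l2, l1) :: ms)).get? t = some l1 := by
      rw [PySem.Dict.get?_mk_cons]; simp [ht]
    simp only [resolveB, hget, subT, if_pos ht]
    exact avoid ms l2 l1 hk hv ms.length l1 hne
  · rw [avoid ms l2 l1 hk hv (ms.length + 1) t ht]
    rw [fuelirr ms ho (rankM ms t) t (ms.length + 1) ms.length rfl
      (by have := rankm_le ms t; omega) (rankm_le ms t)]
    simp [subT, ht]


-- ---- substitution vs labels ----
theorem subT_startswith (l2 l1 t : String) (h1 : PySem.Str.startswith l1 "." = true)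
    (h2 : PySem.Str.startswith l2 "." = true) :
    PySem.Str.startswith (subT l2 l1 t) "." = PySem.Str.startswith t "." := by
  unfold subT
  split
  · next h => rw [h1, h, h2]
  · rfl

theorem startswith_ne_empty (sv : String) (h : PySem.Str.startswith sv "." = true) : sv ≠ "" := by
  intro he; subst he; exact absurd h (by decide)

theorem lbl_subL (l2 l1 : String) (h1 : PySem.Str.startswith l1 "." = true)
    (h2 : PySem.Str.startswith l2 "." = true) (line : List String) :
    pyIsLabelLine (subL l2 l1 line) = pyIsLabelLine line := by
  cases line with
  | nil => rfl
  | cons t rest =>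
    unfold pyIsLabelLine pyHead0 subL
    simp only [List.map_cons, PySem.List.pyGet?_zero_cons, Option.getD_some]
    exact subT_startswith l2 l1 t h1 h2


theorem head0_subL (l2 l1 : String) (h2 : PySem.Str.startswith l2 "." = true) (line : List String) :
    pyHead0 (subL l2 l1 line) = subT l2 l1 (pyHead0 line) := by
  cases line with
  | nil =>
    unfold pyHead0 subL subT
    simp only [List.map_nil]
    rw [if_neg]
    intro h
    exact startswith_ne_empty l2 h2 (by simp_all [PySem.List.pyGet?])
  | cons t rest =>
    unfold pyHead0 subL
    simp [PySem.List.pyGet?_zero_cons]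


theorem nopair_subL (l2 l1 : String) (h1 : PySem.Str.startswith l1 "." = true)
    (h2 : PySem.Str.startswith l2 "." = true) (xs : List (List String)) (h : NoPairP xs) :
    NoPairP (xs.map (subL l2 l1)) := by
  unfold NoPairP at h ⊢
  rw [List.isChain_map]
  apply h.imp
  intro a b hab
  rw [lbl_subL l2 l1 h1 h2 a, lbl_subL l2 l1 h1 h2 b]
  exact hab


-- ---- findPairA characterisations ----
theorem findPairA_none_nopair (xs : List (List String)) (h : findPairA xs = none) : NoPairP xs := by
  induction xs with
  | nil => exact List.IsChain.nil
  | cons x xs ih =>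
    cases xs with
    | nil => exact List.isChain_singleton ..
    | cons y rest =>
      unfold findPairA at h
      by_cases hp : (pyIsLabelLine x && pyIsLabelLine y) = true
      · rw [if_pos hp] at h; exact absurd h (by simp)
      · rw [if_neg hp] at h
        have h2 : findPairA (y :: rest) = none := by
          cases hfp : findPairA (y :: rest) with
          | none => rfl
          | some p => rw [hfp] at h; exact absurd h (by simp)
        refine List.isChain_cons_cons.2 ⟨?_, ih h2⟩
        intro ⟨ha, hb⟩
        exact hp (by simp [ha, hb])


theorem scanA (code : List (List String)) (i : Nat) (l1 l2 : String)
    (h : findPairA code = some (i, l1, l2)) :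
    ∃ pre L1 L2 suf, code = pre ++ L1 :: L2 :: suf ∧ pre.length = i ∧
      NoPairP (pre ++ [L1]) ∧ pyIsLabelLine L1 = true ∧ pyIsLabelLine L2 = true ∧
      l1 = pyHead0 L1 ∧ l2 = pyHead0 L2 := by
  induction code generalizing i l1 l2 with
  | nil => exact absurd h (by simp [findPairA])
  | cons x xs ih =>
    cases xs with
    | nil => exact absurd h (by simp [findPairA])
    | cons y rest =>
      unfold findPairA at h
      by_cases hp : (pyIsLabelLine x && pyIsLabelLine y) = true
      · rw [if_pos hp] at h
        simp only [Option.some.injEq, Prod.mk.injEq] at h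
        obtain ⟨hi, hl1, hl2⟩ := h
        rw [Bool.and_eq_true] at hp
        exact ⟨[], x, y, rest, by simp, by simp [hi], List.isChain_singleton .., hp.1, hp.2,
          hl1.symm, hl2.symm⟩
      · rw [if_neg hp] at h
        cases hfp : findPairA (y :: rest) with
        | none => rw [hfp] at h; exact absurd h (by simp)
        | some p =>
          rw [hfp] at h
          simp only [Option.map_some, Option.some.injEq] at h
          obtain ⟨q, a, b⟩ := p
          simp only [Prod.mk.injEq] at h
          obtain ⟨hi, hl1, hl2⟩ := h
          obtain ⟨pre, L1, L2, suf, hcode, hlen, hnp, hL1, hL2, ha, hb⟩ := ih q a b hfp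
          refine ⟨x :: pre, L1, L2, suf, by simp [hcode], by simp [hlen, hi.symm], ?_, hL1, hL2,
            hl1 ▸ ha, hl2 ▸ hb⟩
          have hhead : (pre ++ [L1]).head? = some y := by
            cases pre with
            | nil => simp_all
            | cons p0 pre' =>
              simp only [List.cons_append, List.head?_cons]
              have : p0 = y := by
                have := hcode
                simp only [List.cons_append, List.cons.injEq] at this
                exact this.1.symm
              rw [this]
          cases hpre : pre ++ [L1] with
          | nil => simp at hpre
          | cons z zs =>
            rw [hpre] at hhead hnp
            rw [List.cons_append, hpre]
            simp only [List.head?_cons, Option.some.injEq] at hhead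
            refine List.isChain_cons_cons.2 ⟨?_, hnp⟩
            intro ⟨hx, hy⟩
            rw [hhead] at hy
            exact hp (by simp [hx, hy])


-- ---- fold lemmas ----
theorem stepB_success (s : BState) (x : List String) (h : s.success = true) :
    (stepB s x).success = true := by
  unfold stepB; dsimp only; split
  · rfl
  · exact h

theorem fold_success (xs : List (List String)) : ∀ s : BState, s.success = true →
    (xs.foldl stepB s).success = true := by
  induction xs with
  | nil => intro s h; exact h
  | cons x xs ih => intro s h; exact ih _ (stepB_success s x h)


def noSucc (s : BState) : BState := { s with success := false }

theorem stepB_noSucc (s s' : BState) (x : List String) (h : noSucc s = noSucc s') :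
    noSucc (stepB s x) = noSucc (stepB s' x) := by
  obtain ⟨m, out, b, p, c⟩ := s
  obtain ⟨m', out', b', p', c'⟩ := s'
  simp only [noSucc, BState.mk.injEq] at h
  obtain ⟨rfl, rfl, -, rfl, rfl⟩ := h
  by_cases hcond : (pyIsLabelLine x && p) = true <;>
    simp [stepB, hcond, noSucc]

theorem fold_noSucc (xs : List (List String)) : ∀ s s' : BState, noSucc s = noSucc s' →
    noSucc (xs.foldl stepB s) = noSucc (xs.foldl stepB s') := by
  induction xs with
  | nil => intro s s' h; exact h
  | cons x xs ih => intro s s' h; exact ih _ _ (stepB_noSucc s s' x h)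


theorem fold_nopair (xs : List (List String)) :
    ∀ (s : BState), NoPairP xs → s.m = PySem.Dict.empty →
    (s.prevLabel = true → ∀ y ∈ xs.head?, pyIsLabelLine y = false) →
    ∃ c, xs.foldl stepB s =
      ⟨PySem.Dict.empty, s.out ++ xs, s.success, ((xs.getLast?.map pyIsLabelLine).getD s.prevLabel), c⟩ := by
  induction xs with
  | nil =>
    intro s _ hm _
    exact ⟨s.canon, by simp [← hm]⟩
  | cons x xs ih =>
    intro s hnp hm hhead
    have hcond : (pyIsLabelLine x && s.prevLabel) = false := by
      by_cases hp : s.prevLabel = true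
      · have := hhead hp x (by simp)
        simp [this]
      · simp [Bool.eq_false_iff.2 hp]
    have hstep : stepB s x =
        ⟨s.m, s.out ++ [x], s.success,
         pyIsLabelLine x,
         if pyIsLabelLine x then resolveB s.m s.m.size (pyHead0 x) else s.canon⟩ := by
      unfold stepB; dsimp only
      rw [if_neg (by simp [hcond])]
    have hnp' : NoPairP xs := by
      cases xs with
      | nil => exact List.IsChain.nil
      | cons y ys => exact (List.isChain_cons_cons.1 hnp).2
    have hhead' : (stepB s x).prevLabel = true → ∀ y ∈ xs.head?, pyIsLabelLine y = false := by
      intro hp y hy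
      cases xs with
      | nil => simp at hy
      | cons z zs =>
        have hyz : y = z := by simpa using hy.symm
        rw [hyz]
        have hrel := (List.isChain_cons_cons.1 hnp).1
        rw [hstep] at hp
        simp only at hp
        by_cases hzl : pyIsLabelLine z = true
        · exact absurd ⟨hp, hzl⟩ hrel
        · simpa using hzl
    obtain ⟨c, hc⟩ := ih (stepB s x) hnp' (by rw [hstep]; exact hm) hhead'
    refine ⟨c, ?_⟩
    rw [List.foldl_cons, hc, hstep]
    simp only
    congr 1
    · simp
    · cases xs with
      | nil => simp
      | cons z zs =>
        have hsm : ((z :: zs).getLast?).isSome := by simp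
        obtain ⟨w, hw⟩ := Option.isSome_iff_exists.1 hsm
        simp [List.getLast?_cons_cons, hw]


-- ---- the correspondence between the two folds after the first merge ----
structure Corr (l1 l2 : String) (sL sR : BState) : Prop where
  meq : sL.m = PySem.Dict.mk ((l2, l1) :: sR.m.items)
  outeq : sR.out = sL.out.map (subL l2 l1)
  ceq : sR.canon = sL.canon
  peq : sR.prevLabel = sL.prevLabel
  hk : l2 ∉ keysOf sR.m.items
  hv : l2 ∉ sR.m.items.map Prod.snd
  hord : OrdA [] ((l2, l1) :: sR.m.items)
  hcanon : sL.prevLabel = true → sL.canon ∉ keysOf ((l2, l1) :: sR.m.items)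

theorem keysOf_append (ms : List (String × String)) (r c : String) :
    keysOf (ms ++ [(r, c)]) = keysOf ms ++ [r] := by
  simp [keysOf]

theorem corr_step (l1 l2 : String) (h1 : PySem.Str.startswith l1 "." = true)
    (h2 : PySem.Str.startswith l2 "." = true) (ln : List String) (sL sR : BState)
    (hc : Corr l1 l2 sL sR) : Corr l1 l2 (stepB sL ln) (stepB sR (subL l2 l1 ln)) := by
  obtain ⟨meq, outeq, ceq, peq, hk, hv, hord, hcanon⟩ := hc
  have hne : l1 ≠ l2 := hord.2.1
  have hoMs : OrdA [] sR.m.items := ordA_mono _ [l2] [] (by simp) hord.2.2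
  have hsizeL : sL.m.size = sR.m.items.length + 1 := by rw [meq]; rfl
  have hsizeR : sR.m.size = sR.m.items.length := rfl
  have hr : resolveB sL.m sL.m.size (pyHead0 ln) =
      resolveB sR.m sR.m.size (subT l2 l1 (pyHead0 ln)) := by
    rw [hsizeL, hsizeR, meq]
    exact rs sR.m.items l2 l1 hk hv hne hoMs (pyHead0 ln)
  have hnk : resolveB sL.m sL.m.size (pyHead0 ln) ∉ keysOf ((l2, l1) :: sR.m.items) := by
    rw [hsizeL, meq]
    exact nonkey _ hord (rankM ((l2, l1) :: sR.m.items) (pyHead0 ln)) (pyHead0 ln) _ rfl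
      (by simpa using rankm_le ((l2, l1) :: sR.m.items) (pyHead0 ln))
  have hkeysL : sL.m.keys = keysOf ((l2, l1) :: sR.m.items) := by rw [meq]; rfl
  have hkeysR : sR.m.keys = keysOf sR.m.items := rfl
  have hisl : pyIsLabelLine (subL l2 l1 ln) = pyIsLabelLine ln := lbl_subL l2 l1 h1 h2 ln
  have hh0 : pyHead0 (subL l2 l1 ln) = subT l2 l1 (pyHead0 ln) := head0_subL l2 l1 h2 ln
  unfold stepB
  dsimp only
  rw [hisl, peq, ceq, hh0, ← hr]
  by_cases hcond : (pyIsLabelLine ln && sL.prevLabel) = true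
  · rw [if_pos hcond, if_pos hcond]
    have hprev : sL.prevLabel = true := ((by simpa using hcond : pyIsLabelLine ln = true ∧ sL.prevLabel = true)).2
    have hcn : sL.canon ∉ keysOf ((l2, l1) :: sR.m.items) := hcanon hprev
    by_cases hrc : resolveB sL.m sL.m.size (pyHead0 ln) = sL.canon
    · rw [if_pos hrc, if_pos hrc]
      exact ⟨meq, outeq, rfl, rfl, hk, hv, hord, fun _ => hcn⟩
    · rw [if_neg hrc, if_neg hrc]
      have hnkL : sL.m.contains (resolveB sL.m sL.m.size (pyHead0 ln)) = false := by
        rw [PySem.Dict.contains_eq_decide_mem_keys, hkeysL]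
        simpa using hnk
      have hnkR : sR.m.contains (resolveB sL.m sL.m.size (pyHead0 ln)) = false := by
        rw [PySem.Dict.contains_eq_decide_mem_keys, hkeysR]
        simp only [decide_eq_false_iff_not]
        exact fun hmem => hnk (List.mem_cons_of_mem _ hmem)
      have hitemsR : (sR.m.insert (resolveB sL.m sL.m.size (pyHead0 ln)) sL.canon).items =
          sR.m.items ++ [(resolveB sL.m sL.m.size (pyHead0 ln), sL.canon)] :=
        PySem.Dict.items_insert_of_not_contains _ _ hnkR
      have hitemsL : (sL.m.insert (resolveB sL.m sL.m.size (pyHead0 ln)) sL.canon).items =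
          ((l2, l1) :: sR.m.items) ++ [(resolveB sL.m sL.m.size (pyHead0 ln), sL.canon)] := by
        rw [PySem.Dict.items_insert_of_not_contains _ _ hnkL, meq]
      have hl2r : l2 ≠ resolveB sL.m sL.m.size (pyHead0 ln) := by
        intro h
        apply hnk
        rw [← h]
        simp [keysOf]
      refine ⟨?_, outeq, rfl, rfl, ?_, ?_, ?_, ?_⟩
      · apply PySem.Dict.ext
        rw [hitemsL, hitemsR]
        rfl
      · rw [hitemsR, keysOf_append]
        simp only [List.mem_append, List.mem_singleton]
        rintro (h | h)
        · exact hk h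
        · exact hl2r h
      · rw [hitemsR]
        simp only [List.map_append, List.mem_append, List.map_cons, List.map_nil,
          List.mem_singleton]
        rintro (h | h)
        · exact hv h
        · apply hcn; rw [h]; simp [keysOf]
      · rw [hitemsR, show ((l2, l1) :: (sR.m.items ++ [(resolveB sL.m sL.m.size (pyHead0 ln), sL.canon)])) = ((l2, l1) :: sR.m.items) ++ [(resolveB sL.m sL.m.size (pyHead0 ln), sL.canon)] from by simp]
        rw [ordA_append]
        exact ⟨hord, by simp, hcn, fun h => hrc h.symm⟩
      · intro _
        rw [hitemsR, show ((l2, l1) :: (sR.m.items ++ [(resolveB sL.m sL.m.size (pyHead0 ln), sL.canon)])) = ((l2, l1) :: sR.m.items) ++ [(resolveB sL.m sL.m.size (pyHead0 ln), sL.canon)] from by simp]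
        rw [keysOf_append]
        simp only [List.mem_append, List.mem_singleton]
        rintro (h | h)
        · exact hcn h
        · exact hrc h.symm
  · rw [if_neg hcond, if_neg hcond]
    refine ⟨meq, by simp [outeq, subL], rfl, rfl, hk, hv, hord, ?_⟩
    intro hp
    simp only at hp
    cases hb : pyIsLabelLine ln with
    | false => rw [hb] at hp; exact absurd hp (by simp)
    | true =>
      simpa using hnk

theorem corr_fold (l1 l2 : String) (h1 : PySem.Str.startswith l1 "." = true)
    (h2 : PySem.Str.startswith l2 "." = true) (suf : List (List String)) :
    ∀ (sL sR : BState), Corr l1 l2 sL sR →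
    Corr l1 l2 (suf.foldl stepB sL) ((suf.map (subL l2 l1)).foldl stepB sR) := by
  induction suf with
  | nil => intro sL sR hc; exact hc
  | cons ln suf ih =>
    intro sL sR hc
    simp only [List.map_cons, List.foldl_cons]
    exact ih _ _ (corr_step l1 l2 h1 h2 ln sL sR hc)


theorem corr_final (l1 l2 : String) (hne : l1 ≠ l2) (sL sR : BState) (hc : Corr l1 l2 sL sR) :
    sR.out.map (fun line => line.map (fun t => resolveB sR.m sR.m.size t)) =
      sL.out.map (fun line => line.map (fun t => resolveB sL.m sL.m.size t)) := by
  obtain ⟨meq, outeq, ceq, peq, hk, hv, hord, hcanon⟩ := hc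
  have hoMs : OrdA [] sR.m.items := ordA_mono _ [l2] [] (by simp) hord.2.2
  have hsizeL : sL.m.size = sR.m.items.length + 1 := by rw [meq]; rfl
  have hsizeR : sR.m.size = sR.m.items.length := rfl
  have hr : ∀ t, resolveB sL.m sL.m.size t =
      resolveB sR.m sR.m.size (subT l2 l1 t) := by
    intro t
    rw [hsizeL, hsizeR, meq]
    exact rs sR.m.items l2 l1 hk hv hne hoMs t
  rw [outeq, List.map_map]
  apply List.map_congr_left
  intro line _
  simp only [Function.comp_def, subL, List.map_map]
  apply List.map_congr_left
  intro t _
  exact (hr t).symm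


theorem resolveB_zero (m : PySem.Dict String String) (t : String) : resolveB m 0 t = t := rfl

theorem eraseIdx_mid : ∀ (a : List (List String)) (x y : List String) (b : List (List String)),
    (a ++ x :: y :: b).eraseIdx (a.length + 1) = a ++ x :: b := by
  intro a
  induction a with
  | nil => intro x y b; rfl
  | cons p a ih =>
    intro x y b
    simp only [List.cons_append, List.length_cons, List.eraseIdx]
    rw [ih]

theorem main_aux : ∀ fuel code, code.length ≤ fuel →
    removeMultiLabelsGo fuel code = removeMultiLabels_alt code := by
  intro fuel
  induction fuel with
  | zero =>
    intro code hlen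
    have : code = [] := List.length_eq_zero_iff.1 (Nat.le_zero.1 hlen)
    subst this
    rfl
  | succ fuel ih =>
    intro code hlen
    rw [show removeMultiLabelsGo (fuel + 1) code =
      (match findPairA code with
       | none => (code, false)
       | some (i, l1, l2) =>
         let replaced := code.map (fun line => line.map (fun t => if t = l2 then l1 else t))
         let popped := replaced.eraseIdx (i + 1)
         ((removeMultiLabelsGo fuel popped).1, true)) from rfl]
    cases hfp : findPairA code with
    | none =>
      have hnp := findPairA_none_nopair code hfp
      obtain ⟨c, hfold⟩ := fold_nopair code ⟨PySem.Dict.empty, [], false, false, ""⟩ hnp rfl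
        (by intro h; exact absurd h (by simp))
      show (code, false) = removeMultiLabels_alt code
      unfold removeMultiLabels_alt
      rw [hfold]
      simp [resolveB_zero]
    | some p =>
      obtain ⟨i, l1, l2⟩ := p
      obtain ⟨pre, L1, L2, suf, rfl, hilen, hnp, hL1, hL2, hl1, hl2⟩ := scanA _ i l1 l2 hfp
      subst hl1
      subst hl2
      subst hilen
      have hsw1 : PySem.Str.startswith (pyHead0 L1) "." = true := hL1
      have hsw2 : PySem.Str.startswith (pyHead0 L2) "." = true := hL2
      -- the popped/substituted program
      have hsubfun : (fun line => line.map (fun t => if t = pyHead0 L2 then pyHead0 L1 else t)) =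
          subL (pyHead0 L2) (pyHead0 L1) := rfl
      have hpop : ((pre ++ L1 :: L2 :: suf).map (subL (pyHead0 L2) (pyHead0 L1))).eraseIdx (pre.length + 1) =
          pre.map (subL (pyHead0 L2) (pyHead0 L1)) ++
            subL (pyHead0 L2) (pyHead0 L1) L1 :: suf.map (subL (pyHead0 L2) (pyHead0 L1)) := by
        rw [List.map_append, List.map_cons, List.map_cons]
        have h := eraseIdx_mid (pre.map (subL (pyHead0 L2) (pyHead0 L1)))
          (subL (pyHead0 L2) (pyHead0 L1) L1) (subL (pyHead0 L2) (pyHead0 L1) L2)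
          (suf.map (subL (pyHead0 L2) (pyHead0 L1)))
        simpa using h
      -- prefix fold facts (left world)
      have hnp_parts := List.isChain_append.1 hnp
      have hnp_pre : NoPairP pre := hnp_parts.1
      obtain ⟨c0, hfold_pre⟩ := fold_nopair pre ⟨PySem.Dict.empty, [], false, false, ""⟩ hnp_pre rfl
        (by intro h; exact absurd h (by simp))
      have hprevP : ((pre.getLast?.map pyIsLabelLine).getD false) = false := by
        cases hlast : pre.getLast? with
        | none => rfl
        | some x =>
          have := hnp_parts.2.2 x (by simp [hlast]) L1 (by simp)
          simp only [Option.map_some, Option.getD_some]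
          by_cases hx : pyIsLabelLine x = true
          · exact absurd ⟨hx, hL1⟩ this
          · simpa using hx
      have hzsize : (PySem.Dict.empty : PySem.Dict String String).size = 0 := rfl
      have hA1 : ∀ (out : List (List String)) (c : String),
          stepB ⟨PySem.Dict.empty, out, false, false, c⟩ L1 =
          ⟨PySem.Dict.empty, out ++ [L1], false, true, pyHead0 L1⟩ := by
        intro out c
        simp [stepB, hL1, hzsize, resolveB_zero]
      have hA2 : stepB ⟨PySem.Dict.empty, pre ++ [L1], false, true, pyHead0 L1⟩ L2 =
          ⟨if pyHead0 L2 = pyHead0 L1 then PySem.Dict.empty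
            else PySem.Dict.empty.insert (pyHead0 L2) (pyHead0 L1),
           pre ++ [L1], true, true, pyHead0 L1⟩ := by
        simp [stepB, hL2, hzsize, resolveB_zero]
      have hfoldL : (pre ++ L1 :: L2 :: suf).foldl stepB ⟨PySem.Dict.empty, [], false, false, ""⟩ =
          suf.foldl stepB
            ⟨if pyHead0 L2 = pyHead0 L1 then PySem.Dict.empty
              else PySem.Dict.empty.insert (pyHead0 L2) (pyHead0 L1),
             pre ++ [L1], true, true, pyHead0 L1⟩ := by
        rw [List.foldl_append, List.foldl_cons, List.foldl_cons, hfold_pre, hprevP, List.nil_append,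
          hA1, hA2]
      have hlen2 : (pre.map (subL (pyHead0 L2) (pyHead0 L1)) ++
          subL (pyHead0 L2) (pyHead0 L1) L1 :: suf.map (subL (pyHead0 L2) (pyHead0 L1))).length ≤ fuel := by
        simp only [List.length_append, List.length_cons, List.length_map] at *
        omega
      show ((removeMultiLabelsGo fuel
          (((pre ++ L1 :: L2 :: suf).map (fun line => line.map (fun t => if t = pyHead0 L2 then pyHead0 L1 else t))).eraseIdx (pre.length + 1))).1, true) =
        removeMultiLabels_alt (pre ++ L1 :: L2 :: suf)
      rw [hsubfun, hpop]
      rw [ih _ hlen2]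
      by_cases hll : pyHead0 L2 = pyHead0 L1
      · -- the two labels are the same string: substitution is the identity
        have hid : subL (pyHead0 L2) (pyHead0 L1) = fun line => line := by
          funext line
          unfold subL subT
          rw [hll]
          rw [show (fun t => if t = pyHead0 L1 then pyHead0 L1 else t) = fun t : String => t from
            funext fun t => by by_cases h : t = pyHead0 L1 <;> simp [h]]
          exact List.map_id' line
        rw [hid]
        simp only [List.map_id']
        have hfoldR : (pre ++ L1 :: suf).foldl stepB ⟨PySem.Dict.empty, [], false, false, ""⟩ =
            suf.foldl stepB ⟨PySem.Dict.empty, pre ++ [L1], false, true, pyHead0 L1⟩ := by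
          rw [List.foldl_append, List.foldl_cons, hfold_pre, hprevP, List.nil_append, hA1]
        unfold removeMultiLabels_alt
        rw [hfoldL, hfoldR, if_pos hll]
        have hns := fold_noSucc suf ⟨PySem.Dict.empty, pre ++ [L1], true, true, pyHead0 L1⟩
          ⟨PySem.Dict.empty, pre ++ [L1], false, true, pyHead0 L1⟩ rfl
        have hm := congrArg BState.m hns
        have hout := congrArg BState.out hns
        simp only [noSucc] at hm hout
        have hsucc := fold_success suf ⟨PySem.Dict.empty, pre ++ [L1], true, true, pyHead0 L1⟩ rfl
        simp only []
        rw [hsucc, hm, hout]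
      · -- distinct labels: the left fold carries the extra (l2 ↦ l1) entry
        have hne12 : pyHead0 L1 ≠ pyHead0 L2 := fun h => hll h.symm
        have hnp_spre : NoPairP (pre.map (subL (pyHead0 L2) (pyHead0 L1))) :=
          nopair_subL _ _ hsw1 hsw2 pre hnp_pre
        obtain ⟨c0', hfold_spre⟩ := fold_nopair (pre.map (subL (pyHead0 L2) (pyHead0 L1)))
          ⟨PySem.Dict.empty, [], false, false, ""⟩ hnp_spre rfl
          (by intro h; exact absurd h (by simp))
        have hprevP' : (((pre.map (subL (pyHead0 L2) (pyHead0 L1))).getLast?.map pyIsLabelLine).getD false) = false := by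
          rw [List.getLast?_map]
          cases hlast : pre.getLast? with
          | none => rfl
          | some x =>
            simp only [Option.map_map, Option.map_some, Option.getD_some, Function.comp_def]
            rw [lbl_subL _ _ hsw1 hsw2 x]
            have := hnp_parts.2.2 x (by simp [hlast]) L1 (by simp)
            by_cases hx : pyIsLabelLine x = true
            · exact absurd ⟨hx, hL1⟩ this
            · simpa using hx
        have hA1' : stepB ⟨PySem.Dict.empty, pre.map (subL (pyHead0 L2) (pyHead0 L1)), false, false, c0'⟩
            (subL (pyHead0 L2) (pyHead0 L1) L1) =
            ⟨PySem.Dict.empty, pre.map (subL (pyHead0 L2) (pyHead0 L1)) ++ [subL (pyHead0 L2) (pyHead0 L1) L1],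
             false, true, pyHead0 L1⟩ := by
          simp [stepB, lbl_subL _ _ hsw1 hsw2, hL1, hzsize, resolveB_zero,
            head0_subL _ _ hsw2, subT]
        have hfoldR : (pre.map (subL (pyHead0 L2) (pyHead0 L1)) ++
            subL (pyHead0 L2) (pyHead0 L1) L1 :: suf.map (subL (pyHead0 L2) (pyHead0 L1))).foldl stepB
              ⟨PySem.Dict.empty, [], false, false, ""⟩ =
            (suf.map (subL (pyHead0 L2) (pyHead0 L1))).foldl stepB
              ⟨PySem.Dict.empty, pre.map (subL (pyHead0 L2) (pyHead0 L1)) ++ [subL (pyHead0 L2) (pyHead0 L1) L1],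
               false, true, pyHead0 L1⟩ := by
          rw [List.foldl_append, List.foldl_cons, hfold_spre, hprevP', List.nil_append, hA1']
        have hins : PySem.Dict.empty.insert (pyHead0 L2) (pyHead0 L1) =
            PySem.Dict.mk [(pyHead0 L2, pyHead0 L1)] := by
          apply PySem.Dict.ext
          rw [PySem.Dict.items_insert_of_not_contains _ _ (by simp)]
          rfl
        have hcorr0 : Corr (pyHead0 L1) (pyHead0 L2)
            ⟨PySem.Dict.empty.insert (pyHead0 L2) (pyHead0 L1), pre ++ [L1], true, true, pyHead0 L1⟩
            ⟨PySem.Dict.empty, pre.map (subL (pyHead0 L2) (pyHead0 L1)) ++ [subL (pyHead0 L2) (pyHead0 L1) L1],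
             false, true, pyHead0 L1⟩ := by
          have hempty_items : (PySem.Dict.empty : PySem.Dict String String).items = [] := rfl
          refine ⟨?_, ?_, rfl, rfl, ?_, ?_, ?_, ?_⟩
          · rw [hins]; rfl
          · simp
          · simp [keysOf, hempty_items]
          · simp [hempty_items]
          · exact ⟨by simp, hne12, trivial⟩
          · intro _
            simp only [hempty_items, keysOf, List.map_cons, List.map_nil, List.mem_singleton,
              List.mem_cons]
            rintro (h | h)
            · exact hne12 h
            · simp at h
        have hcorr := corr_fold (pyHead0 L1) (pyHead0 L2) hsw1 hsw2 suf _ _ hcorr0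
        have hfin := corr_final (pyHead0 L1) (pyHead0 L2) hne12 _ _ hcorr
        have hsucc := fold_success suf
          ⟨PySem.Dict.empty.insert (pyHead0 L2) (pyHead0 L1), pre ++ [L1], true, true, pyHead0 L1⟩ rfl
        unfold removeMultiLabels_alt
        rw [hfoldL, hfoldR, if_neg hll]
        simp only []
        rw [hsucc, hfin]


-- ===== VERDICT (by name: the statement is the Claim_ definition above) =====
theorem removeMultiLabels_spec : Claim_equal_removeMultiLabels := by
  intro code _ _
  unfold Spec_removeMultiLabels removeMultiLabels
  rw [main_aux code.length code (le_refl _)]
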